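-- pv_equiv track=rewrite | github.com/hephae-co/hephae-forge | packages/common-python/hephae_common/report_templates.py | _cta_section
-- ===== SOURCE A (Python) =====
-- HEPHAE_APP_URL = "https://hephae.co"
--
-- _REPORT_ACTIONS: dict[str, list[tuple[str, str, str]]] = {
--     "profile":     [("Margin Surgery", "💰", "margin"), ("Foot Traffic Forecast", "📊", "traffic"), ("SEO Deep Audit", "🔍", "seo"), ("Competitive Analysis", "⚔️", "competitive"), ("Social Media Insights", "📱", "marketing")],
--     "margin":      [("Foot Traffic Forecast", "📊", "traffic"), ("SEO Deep Audit", "🔍", "seo"), ("Competitive Analysis", "⚔️", "competitive"), ("Social Media Insights", "📱", "marketing")],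
--     "traffic":     [("Margin Surgery", "💰", "margin"), ("SEO Deep Audit", "🔍", "seo"), ("Competitive Analysis", "⚔️", "competitive"), ("Social Media Insights", "📱", "marketing")],
--     "seo":         [("Margin Surgery", "💰", "margin"), ("Foot Traffic Forecast", "📊", "traffic"), ("Competitive Analysis", "⚔️", "competitive"), ("Social Media Insights", "📱", "marketing")],
--     "competitive": [("Margin Surgery", "💰", "margin"), ("Foot Traffic Forecast", "📊", "traffic"), ("SEO Deep Audit", "🔍", "seo"), ("Social Media Insights", "📱", "marketing")],
--     "marketing":   [("Margin Surgery", "💰", "margin"), ("Foot Traffic Forecast", "📊", "traffic"), ("SEO Deep Audit", "🔍", "seo"), ("Competitive Analysis", "⚔️", "competitive")],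
-- }
--
-- def _cta_section(report_type: str) -> str:
--     """Build the call-to-action section with links to the app and other analyses."""
--     actions = _REPORT_ACTIONS.get(report_type, list(_REPORT_ACTIONS.values())[0])
--     action_btns = "".join(
--         f'<a href="{HEPHAE_APP_URL}" target="_blank" class="cta-btn cta-secondary">{emoji} {label}</a>'
--         for label, emoji, _ in actions
--     )
--     return f"""
--     <div class="cta-section card">
--       <h3>Unlock more insights for your business</h3>
--       <p>Hephae runs AI-powered analyses across every dimension of your business.</p>
--       <div class="cta-buttons">
--         <a href="{HEPHAE_APP_URL}" target="_blank" class="cta-btn cta-primary">🚀 Try Hephae</a>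
--         {action_btns}
--       </div>
--     </div>"""
-- ===== SOURCE B (Python) =====
-- HEPHAE_APP_URL = "https://hephae.co"
--
-- # Single master list of all five actions in order; each report type's action list
-- # is the master list with its own key filtered out (profile/unknown keep all five).
-- _MASTER_ACTIONS: list[tuple[str, str, str]] = [
--     ("Margin Surgery", "💰", "margin"),
--     ("Foot Traffic Forecast", "📊", "traffic"),
--     ("SEO Deep Audit", "🔍", "seo"),
--     ("Competitive Analysis", "⚔️", "competitive"),
--     ("Social Media Insights", "📱", "marketing"),
-- ]
--
-- def _cta_section(report_type: str) -> str:
--     """Build the call-to-action section with links to the app and other analyses."""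
--     actions = [t for t in _MASTER_ACTIONS if t[2] != report_type]
--     action_btns = "".join(
--         f'<a href="{HEPHAE_APP_URL}" target="_blank" class="cta-btn cta-secondary">{emoji} {label}</a>'
--         for label, emoji, _ in actions
--     )
--     return f"""
--     <div class="cta-section card">
--       <h3>Unlock more insights for your business</h3>
--       <p>Hephae runs AI-powered analyses across every dimension of your business.</p>
--       <div class="cta-buttons">
--         <a href="{HEPHAE_APP_URL}" target="_blank" class="cta-btn cta-primary">🚀 Try Hephae</a>
--         {action_btns}
--       </div>
--     </div>"""
-- ===== Notes on version B (the rewrite author's own statement) =====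
-- stated objective: simpler
-- what changed: Replaces the dict of six precomputed per-type action lists with one master list of the five actions, each type's list obtained by filtering out its own key (unknown types and 'profile' keep all five, matching A's default).
import Mathlib
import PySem

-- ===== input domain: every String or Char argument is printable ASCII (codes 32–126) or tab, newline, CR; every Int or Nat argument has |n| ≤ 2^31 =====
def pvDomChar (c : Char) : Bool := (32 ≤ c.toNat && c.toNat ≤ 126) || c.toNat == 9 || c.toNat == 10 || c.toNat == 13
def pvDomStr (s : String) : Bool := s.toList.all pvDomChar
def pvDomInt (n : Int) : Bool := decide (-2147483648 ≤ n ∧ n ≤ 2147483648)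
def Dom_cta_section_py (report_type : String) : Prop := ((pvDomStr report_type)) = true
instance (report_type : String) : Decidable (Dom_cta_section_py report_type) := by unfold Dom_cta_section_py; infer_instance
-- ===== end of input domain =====

-- B replaces A's dict of six precomputed action lists with one master list filtered by the
-- report type's own key (objective: simpler). Both assemble the same HTML.

-- shared literal rendering of the f-string / join HTML assembly (identical in Source A and Source B)
def pvRender (actions : List (String × String × String)) : String :=
  let action_btns := PySem.Str.join "" (actions.map (fun t =>
    "<a href=\"https://hephae.co\" target=\"_blank\" class=\"cta-btn cta-secondary\">" ++ t.2.1 ++ " " ++ t.1 ++ "</a>"))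
  "\n    <div class=\"cta-section card\">\n      <h3>Unlock more insights for your business</h3>\n      <p>Hephae runs AI-powered analyses across every dimension of your business.</p>\n      <div class=\"cta-buttons\">\n        <a href=\"https://hephae.co\" target=\"_blank\" class=\"cta-btn cta-primary\">🚀 Try Hephae</a>\n        " ++ action_btns ++ "\n      </div>\n    </div>"

-- ===== PORT A =====
def pvReportActions : PySem.Dict String (List (String × String × String)) := PySem.Dict.mk
  [ ("profile",     [("Margin Surgery", "💰", "margin"), ("Foot Traffic Forecast", "📊", "traffic"), ("SEO Deep Audit", "🔍", "seo"), ("Competitive Analysis", "⚔️", "competitive"), ("Social Media Insights", "📱", "marketing")])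
  , ("margin",      [("Foot Traffic Forecast", "📊", "traffic"), ("SEO Deep Audit", "🔍", "seo"), ("Competitive Analysis", "⚔️", "competitive"), ("Social Media Insights", "📱", "marketing")])
  , ("traffic",     [("Margin Surgery", "💰", "margin"), ("SEO Deep Audit", "🔍", "seo"), ("Competitive Analysis", "⚔️", "competitive"), ("Social Media Insights", "📱", "marketing")])
  , ("seo",         [("Margin Surgery", "💰", "margin"), ("Foot Traffic Forecast", "📊", "traffic"), ("Competitive Analysis", "⚔️", "competitive"), ("Social Media Insights", "📱", "marketing")])
  , ("competitive", [("Margin Surgery", "💰", "margin"), ("Foot Traffic Forecast", "📊", "traffic"), ("SEO Deep Audit", "🔍", "seo"), ("Social Media Insights", "📱", "marketing")])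
  , ("marketing",   [("Margin Surgery", "💰", "margin"), ("Foot Traffic Forecast", "📊", "traffic"), ("SEO Deep Audit", "🔍", "seo"), ("Competitive Analysis", "⚔️", "competitive")]) ]

def cta_section_py (report_type : String) : String :=
  -- list(_REPORT_ACTIONS.values())[0]: index 0 of a nonempty literal list, total here (getD [] never used)
  let actions := (pvReportActions.get? report_type).getD
    ((PySem.List.pyGet? pvReportActions.values 0).getD [])
  pvRender actions

-- ===== PORT B =====
def pvMasterActions : List (String × String × String) :=
  [ ("Margin Surgery", "💰", "margin")
  , ("Foot Traffic Forecast", "📊", "traffic")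
  , ("SEO Deep Audit", "🔍", "seo")
  , ("Competitive Analysis", "⚔️", "competitive")
  , ("Social Media Insights", "📱", "marketing") ]

def cta_section_py_alt (report_type : String) : String :=
  let actions := pvMasterActions.filter (fun t => t.2.2 != report_type)
  pvRender actions

-- ===== PRECONDITION & SPEC =====
def Spec_cta_section_py (report_type : String) (out : String) : Prop := out = cta_section_py_alt report_type
instance (report_type : String) (out : String) : Decidable (Spec_cta_section_py report_type out) := by unfold Spec_cta_section_py; infer_instance

-- ===== CLAIM (what is proved, stated in full; the proofs are below) =====
def Claim_equal_cta_section_py : Prop := ∀ (report_type : String), Dom_cta_section_py report_type → Spec_cta_section_py report_type (cta_section_py report_type)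

-- ===== LEMMAS AND PROOFS =====

lemma pv_actions_eq (rt : String) :
    (pvReportActions.get? rt).getD ((PySem.List.pyGet? pvReportActions.values 0).getD [])
      = pvMasterActions.filter (fun t => t.2.2 != rt) := by
  by_cases h1 : rt = "margin"; · subst h1; decide
  by_cases h2 : rt = "traffic"; · subst h2; decide
  by_cases h3 : rt = "seo"; · subst h3; decide
  by_cases h4 : rt = "competitive"; · subst h4; decide
  by_cases h5 : rt = "marketing"; · subst h5; decide
  by_cases h6 : rt = "profile"; · subst h6; decide
  have e : ∀ s : String, rt ≠ s → (s == rt) = false := by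
    intro s hs; simp; exact fun h => hs h.symm
  simp [pvReportActions, pvMasterActions, PySem.Dict.get?,
    e _ h1, e _ h2, e _ h3, e _ h4, e _ h5, e _ h6,
    List.filter, bne]

-- ===== VERDICT (by name: the statement is the Claim_ definition above) =====
theorem cta_section_py_spec : Claim_equal_cta_section_py := by
  intro rt _
  unfold Spec_cta_section_py cta_section_py cta_section_py_alt
  rw [pv_actions_eq]
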